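-- pv_equiv track=rewrite | github.com/beebrain/ATFS_Thai_Finger_Spelling | BaseLineMethod_test.py | getFrameStartStop
-- ===== SOURCE A (Python) =====
-- def getFrameStartStop(FramePredict):
--     signStatus = False
--     listofFrame = []
--     alphabetFrame = []
--     for indexFrame, frame_value in enumerate(FramePredict):
--
--         if signStatus == False:   #transition mode
--             if frame_value == 0:
--                 continue
--             else:
--                 alphabetFrame = []
--                 alphabetFrame += [indexFrame+1]  # video frame start with index 1
--                 signStatus = True
--         else:                      #Alphabet mode
--             if frame_value == 0:
--                 signStatus = False
--                 listofFrame += [alphabetFrame]    ## add sequence alphabet frame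
--             else:
--                 alphabetFrame += [indexFrame+1]  # video frame start with index 1
--                 signStatus = True
--     return listofFrame
-- ===== SOURCE B (Python) =====
-- def getFrameStartStop(FramePredict):
--     # Zero-boundary scan: keep only the 0-based start of the current non-zero
--     # stretch; each time a zero is seen, emit the 1-based index range of the
--     # stretch that just ended (if non-empty).  A trailing non-zero stretch is
--     # never followed by a zero, so it is naturally dropped, matching A.
--     out = []
--     start = 0  # 0-based index just after the last zero seen
--     for i, v in enumerate(FramePredict):
--         if v == 0:
--             if i > start:
--                 out.append(list(range(start + 1, i + 1)))
--             start = i + 1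
--     return out
-- ===== Notes on version B (the rewrite author's own statement) =====
-- stated objective: simpler
-- what changed: Replaces A's boolean-mode state machine that accumulates the current frame list element by element with a zero-boundary scan keeping only the start index of the current non-zero stretch and emitting it as a range when a zero terminates it.
import Mathlib
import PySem

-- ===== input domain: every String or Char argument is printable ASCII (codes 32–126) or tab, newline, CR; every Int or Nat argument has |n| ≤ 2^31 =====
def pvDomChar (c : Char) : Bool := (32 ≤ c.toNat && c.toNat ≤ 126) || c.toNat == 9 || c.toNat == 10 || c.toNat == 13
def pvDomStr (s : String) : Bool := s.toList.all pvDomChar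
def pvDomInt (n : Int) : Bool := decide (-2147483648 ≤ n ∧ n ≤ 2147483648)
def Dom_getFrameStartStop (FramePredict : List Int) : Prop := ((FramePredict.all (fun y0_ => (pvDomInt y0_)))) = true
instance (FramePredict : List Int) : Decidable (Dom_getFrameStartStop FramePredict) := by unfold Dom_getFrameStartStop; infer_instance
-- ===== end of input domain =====

-- B replaces A's boolean-mode state machine (flag + accumulated frame list) by a
-- zero-boundary scan that only tracks the start of the current non-zero stretch
-- and emits each stretch as a range when a zero terminates it (objective: simpler).

-- ===== PORT A =====
-- state = (signStatus, listofFrame, alphabetFrame)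
def pvStepA (st : Bool × List (List Int) × List Int) (p : Int × Int) :
    Bool × List (List Int) × List Int :=
  let (signStatus, listofFrame, alphabetFrame) := st
  let (indexFrame, frame_value) := p
  if signStatus = false then        -- transition mode
    if frame_value = 0 then st      -- continue
    else (true, listofFrame, [] ++ [indexFrame + 1])
  else                              -- Alphabet mode
    if frame_value = 0 then (false, listofFrame ++ [alphabetFrame], alphabetFrame)
    else (true, listofFrame, alphabetFrame ++ [indexFrame + 1])

def getFrameStartStop (FramePredict : List Int) : List (List Int) :=
  ((PySem.List.enumerate FramePredict 0).foldl pvStepA (false, [], [])).2.1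

-- ===== PORT B =====
-- state = (out, start)  with start = 0-based index just after the last zero seen
def pvStepB (st : List (List Int) × Int) (p : Int × Int) : List (List Int) × Int :=
  let (out, start) := st
  let (i, v) := p
  if v = 0 then
    (if start < i then out ++ [PySem.List.pyRange (start + 1) (i + 1) 1] else out, i + 1)
  else st

def getFrameStartStop_alt (FramePredict : List Int) : List (List Int) :=
  ((PySem.List.enumerate FramePredict 0).foldl pvStepB ([], 0)).1

-- ===== PRECONDITION & SPEC =====
def Spec_getFrameStartStop (FramePredict : List Int) (out : List (List Int)) : Prop := out = getFrameStartStop_alt FramePredict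
instance (FramePredict : List Int) (out : List (List Int)) : Decidable (Spec_getFrameStartStop FramePredict out) := by unfold Spec_getFrameStartStop; infer_instance

-- ===== CLAIM (what is proved, stated in full; the proofs are below) =====
def Claim_equal_getFrameStartStop : Prop := ∀ (FramePredict : List Int), Dom_getFrameStartStop FramePredict → Spec_getFrameStartStop FramePredict (getFrameStartStop FramePredict)

-- ===== LEMMAS AND PROOFS =====

-- Loop invariant: processing the rest of the list from index k, A's mode flag is
-- 'start < k' and its alphabetFrame is the 1-based range of the open stretch.
theorem pvLoop (l : List Int) (k : Int) (out : List (List Int)) (start : Int)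
    (af : List Int) (hsk : start ≤ k)
    (haf : start < k → af = PySem.List.pyRange (start + 1) (k + 1) 1) :
    ((PySem.List.enumerate l k).foldl pvStepA (decide (start < k), out, af)).2.1
      = ((PySem.List.enumerate l k).foldl pvStepB (out, start)).1 := by
  induction l generalizing k out start af with
  | nil => simp [PySem.List.enumerate_nil]
  | cons v l ih =>
    rw [PySem.List.enumerate_cons, List.foldl_cons, List.foldl_cons]
    by_cases hv : v = 0
    · by_cases hlt : start < k
      · have hA : pvStepA (decide (start < k), out, af) (k, v)
            = (false, out ++ [af], af) := by
          simp [pvStepA, hlt, hv]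
        have hB : pvStepB (out, start) (k, v)
            = (out ++ [PySem.List.pyRange (start + 1) (k + 1) 1], k + 1) := by
          simp [pvStepB, hlt, hv]
        rw [hA, hB, haf hlt]
        have := ih (k + 1) (out ++ [PySem.List.pyRange (start + 1) (k + 1) 1])
          (k + 1) (PySem.List.pyRange (start + 1) (k + 1) 1) (le_refl _) (by omega)
        simpa using this
      · have hA : pvStepA (decide (start < k), out, af) (k, v)
            = (decide (start < k), out, af) := by
          simp [pvStepA, hlt, hv]
        have hB : pvStepB (out, start) (k, v) = (out, k + 1) := by
          simp [pvStepB, hlt, hv]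
        rw [hA, hB]
        have := ih (k + 1) out (k + 1) af (le_refl _) (by omega)
        simpa [hlt] using this
    · by_cases hlt : start < k
      · have hA : pvStepA (decide (start < k), out, af) (k, v)
            = (true, out, af ++ [k + 1]) := by
          simp [pvStepA, hlt, hv]
        have hB : pvStepB (out, start) (k, v) = (out, start) := by
          simp [pvStepB, hv]
        rw [hA, hB, haf hlt]
        have haf' : start < k + 1 →
            PySem.List.pyRange (start + 1) (k + 1) 1 ++ [k + 1]
              = PySem.List.pyRange (start + 1) (k + 1 + 1) 1 := by
          intro _
          exact (PySem.List.pyRange_one_succ_right (by omega)).symm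
        have := ih (k + 1) out start
          (PySem.List.pyRange (start + 1) (k + 1) 1 ++ [k + 1]) (by omega)
          (fun h => by rw [haf' h])
        simpa [show (start < k + 1) by omega] using this
      · have hA : pvStepA (decide (start < k), out, af) (k, v)
            = (true, out, [] ++ [k + 1]) := by
          simp [pvStepA, hlt, hv]
        have hB : pvStepB (out, start) (k, v) = (out, start) := by
          simp [pvStepB, hv]
        have hse : start = k := by omega
        rw [hA, hB]
        have haf' : start < k + 1 →
            ([] : List Int) ++ [k + 1] = PySem.List.pyRange (start + 1) (k + 1 + 1) 1 := by
          intro _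
          rw [hse]
          simp [PySem.List.pyRange_one_singleton]
        have := ih (k + 1) out start ([] ++ [k + 1]) (by omega) haf'
        simpa [show (start < k + 1) by omega] using this

-- ===== VERDICT (by name: the statement is the Claim_ definition above) =====
theorem getFrameStartStop_spec : Claim_equal_getFrameStartStop := by
  intro FramePredict _
  unfold Spec_getFrameStartStop getFrameStartStop getFrameStartStop_alt
  have := pvLoop FramePredict 0 [] 0 [] (le_refl _) (by omega)
  simpa using this
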